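-- pv_equiv track=rewrite | github.com/denizsurmeli/project-polarity-tester | project_polarity.py | distribute_punctuation
-- ===== SOURCE A (Python) =====
-- def distribute_punctuation(text,punctuations):
--     metaform_text = text
--     if(punctuations):
--         v = list(metaform_text)
--         for key in punctuations.keys():
--             v.insert(key,punctuations[key])
--             metaform_text = ''.join(v)
--     return metaform_text
-- ===== SOURCE B (Python) =====
-- def distribute_punctuation(text, punctuations):
--     # Gap buffer: pieces before the gap in `pre`, pieces after the gap in
--     # `suf` stored REVERSED; each insert moves the gap with slice memmoves
--     # and appends, and the string is joined ONCE at the end.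
--     pre = []
--     suf = [c for c in reversed(text)]
--     for key, val in punctuations.items():
--         n = len(pre) + len(suf)
--         pos = n + key if key < 0 else key
--         pos = 0 if pos < 0 else (n if pos > n else pos)
--         g = len(pre)
--         if pos > g:
--             m = pos - g
--             moved = suf[len(suf) - m:]
--             del suf[len(suf) - m:]
--             pre.extend(reversed(moved))
--         elif pos < g:
--             moved = pre[pos:]
--             del pre[pos:]
--             suf.extend(reversed(moved))
--         pre.append(val)
--     pre.extend(reversed(suf))
--     return ''.join(pre)
-- ===== Notes on version B (the rewrite author's own statement) =====
-- stated objective: faster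
-- what changed: Replaces A's per-iteration list.insert plus a full ''.join of the whole list on every iteration with a gap buffer (prefix list + reversed suffix list) moved by slice operations and joined once at the end.
import Mathlib
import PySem

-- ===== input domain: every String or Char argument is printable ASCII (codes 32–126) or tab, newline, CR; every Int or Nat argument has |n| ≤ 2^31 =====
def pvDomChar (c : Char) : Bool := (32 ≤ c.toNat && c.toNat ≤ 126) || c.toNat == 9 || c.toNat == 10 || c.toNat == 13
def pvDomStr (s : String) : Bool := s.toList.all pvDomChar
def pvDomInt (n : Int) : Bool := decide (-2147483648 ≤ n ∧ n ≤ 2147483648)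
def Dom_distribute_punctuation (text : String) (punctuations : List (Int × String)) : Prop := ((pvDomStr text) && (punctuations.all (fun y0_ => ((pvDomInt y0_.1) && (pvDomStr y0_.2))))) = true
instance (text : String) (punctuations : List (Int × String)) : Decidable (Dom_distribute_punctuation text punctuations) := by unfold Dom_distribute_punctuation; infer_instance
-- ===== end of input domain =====

-- B replaces A's per-iteration list.insert + full ''.join with a gap buffer moved by
-- slice operations and a single final join (constant-factor faster: the per-iteration join is gone).

-- ===== PORT A =====
-- A's loop state is (v, metaform_text); each iteration inserts punctuations[key] into v
-- (Python list.insert clamping = PySem.List.insert) and re-joins the whole list.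
-- 'punctuations[key]' cannot raise here since key ∈ keys, hence the '.getD ""' never fires.
def aLoop (d : PySem.Dict Int String) (st : List String × String) (key : Int) : List String × String :=
  let v' := PySem.List.insert st.1 key ((d.get? key).getD "")
  (v', PySem.Str.join "" v')

def distribute_punctuation (text : String) (punctuations : List (Int × String)) : String :=
  let metaform_text := text
  let d := PySem.Dict.ofList punctuations
  if d.items = [] then metaform_text
  else
    let v : List String := text.toList.map (fun c => String.ofList [c])
    (d.keys.foldl (aLoop d) (v, metaform_text)).2

-- ===== PORT B =====
-- Gap buffer: pieces before the gap in `pre`, pieces after the gap in `suf` REVERSED;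
-- slice-based gap moves (suf[len-m:] / del / extend(reversed(...)) become drop/take/reverse),
-- one join at the end.
def dpClamp (n key : Int) : Int :=
  let pos := if key < 0 then n + key else key
  if pos < 0 then 0 else if pos > n then n else pos

def dpStep (st : List String × List String) (kv : Int × String) : List String × List String :=
  let pre := st.1
  let suf := st.2
  let n : Int := (pre.length : Int) + (suf.length : Int)
  let pos := (dpClamp n kv.1).toNat
  let g := pre.length
  if pos > g then
    let m := pos - g
    (pre ++ (suf.drop (suf.length - m)).reverse ++ [kv.2], suf.take (suf.length - m))
  else if pos < g then
    (pre.take pos ++ [kv.2], suf ++ (pre.drop pos).reverse)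
  else (pre ++ [kv.2], suf)

def distribute_punctuation_alt (text : String) (punctuations : List (Int × String)) : String :=
  let d := PySem.Dict.ofList punctuations
  let st := d.items.foldl dpStep ([], (text.toList.map (fun c => String.ofList [c])).reverse)
  PySem.Str.join "" (st.1 ++ st.2.reverse)

-- ===== PRECONDITION & SPEC =====
def Spec_distribute_punctuation (text : String) (punctuations : List (Int × String)) (out : String) : Prop := out = distribute_punctuation_alt text punctuations
instance (text : String) (punctuations : List (Int × String)) (out : String) : Decidable (Spec_distribute_punctuation text punctuations out) := by unfold Spec_distribute_punctuation; infer_instance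

-- ===== CLAIM (what is proved, stated in full; the proofs are below) =====
def Claim_equal_distribute_punctuation : Prop := ∀ (text : String) (punctuations : List (Int × String)), Dom_distribute_punctuation text punctuations → Spec_distribute_punctuation text punctuations (distribute_punctuation text punctuations)

-- ===== LEMMAS AND PROOFS =====

-- A's loop body once dict lookups have been resolved to the items' values.
def aStep (st : List String × String) (kv : Int × String) : List String × String :=
  let v' := PySem.List.insert st.1 kv.1 kv.2
  (v', PySem.Str.join "" v')

theorem insert_eq_clamp {α : Type} (xs : List α) (i : Int) (v : α) :
    PySem.List.insert xs i v =
      xs.take (PySem.List.clampIdx xs.length i) ++ v :: xs.drop (PySem.List.clampIdx xs.length i) := by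
  have h : (if i < 0 then max (i + (xs.length : Int)) 0 else min i (xs.length : Int)).toNat
      = PySem.List.clampIdx xs.length i := by
    unfold PySem.List.clampIdx
    split_ifs <;> omega
  simp only [PySem.List.insert, PySem.List.sliceIndices]
  norm_num
  rw [← h]

theorem clampIdx_eq_dpClamp (a b : Nat) (i : Int) :
    PySem.List.clampIdx (a + b) i = (dpClamp ((a : Int) + (b : Int)) i).toNat := by
  unfold PySem.List.clampIdx dpClamp
  dsimp only
  split_ifs <;> omega

-- one gap-buffer step realises one Python list.insert on the flattened list
theorem dpStep_eq (pre suf : List String) (kv : Int × String) :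
    (dpStep (pre, suf) kv).1 ++ (dpStep (pre, suf) kv).2.reverse =
      PySem.List.insert (pre ++ suf.reverse) kv.1 kv.2 := by
  rw [insert_eq_clamp]
  have hlen : (pre ++ suf.reverse).length = pre.length + suf.length := by simp
  rw [hlen, clampIdx_eq_dpClamp]
  unfold dpStep
  dsimp only
  set p := (dpClamp ((pre.length : Int) + (suf.length : Int)) kv.1).toNat with hp
  have hb : p ≤ pre.length + suf.length := by
    rw [hp]; unfold dpClamp; dsimp only; split_ifs <;> omega
  by_cases h1 : p > pre.length
  · rw [if_pos h1]
    rw [List.take_append, List.drop_append,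
        List.take_of_length_le (by omega : pre.length ≤ p),
        List.drop_eq_nil_of_le (by omega : pre.length ≤ p),
        List.take_reverse, List.drop_reverse]
    simp
  · rw [if_neg h1]
    by_cases h2 : p < pre.length
    · rw [if_pos h2]
      rw [List.take_append_of_le_length (by omega), List.drop_append_of_le_length (by omega)]
      simp
    · rw [if_neg h2]
      have hpe : p = pre.length := by omega
      rw [hpe]
      simp

theorem foldl_fst (ps : List (Int × String)) (pre suf : List String) (s : String) :
    (ps.foldl aStep (pre ++ suf.reverse, s)).1 =
      (ps.foldl dpStep (pre, suf)).1 ++ (ps.foldl dpStep (pre, suf)).2.reverse := by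
  induction ps generalizing pre suf s with
  | nil => simp
  | cons kv ps ih =>
    simp only [List.foldl_cons]
    have h : aStep (pre ++ suf.reverse, s) kv
        = ((dpStep (pre, suf) kv).1 ++ (dpStep (pre, suf) kv).2.reverse,
           PySem.Str.join "" ((dpStep (pre, suf) kv).1 ++ (dpStep (pre, suf) kv).2.reverse)) := by
      unfold aStep
      rw [dpStep_eq]
    rw [h, ih]

theorem foldl_snd (ps : List (Int × String)) (v : List String) (s : String) (h : ps ≠ []) :
    (ps.foldl aStep (v, s)).2 = PySem.Str.join "" ((ps.foldl aStep (v, s)).1) := by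
  induction ps generalizing v s with
  | nil => exact absurd rfl h
  | cons kv ps ih =>
    cases ps with
    | nil => simp [aStep]
    | cons b t =>
      rw [List.foldl_cons]
      have := ih (aStep (v, s) kv).1 (aStep (v, s) kv).2 (by simp)
      simpa using this

theorem join_singletons (cs : List Char) :
    PySem.Str.join "" (cs.map (fun c => String.ofList [c])) = String.ofList cs := by
  unfold PySem.Str.join
  have h : (cs.map (fun c => String.ofList [c])).map String.toList = cs.map (fun c => [c]) := by
    simp [List.map_map, Function.comp]
  rw [h]
  have h2 : ("" : String).toList = [] := rfl
  rw [h2, PySem.Chars.join_nil_singletons]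

-- ===== VERDICT (by name: the statement is the Claim_ definition above) =====
theorem distribute_punctuation_spec : Claim_equal_distribute_punctuation := by
  intro text punctuations _
  show distribute_punctuation text punctuations = distribute_punctuation_alt text punctuations
  unfold distribute_punctuation distribute_punctuation_alt
  dsimp only
  by_cases hit : (PySem.Dict.ofList punctuations).items = []
  · rw [if_pos hit, hit]
    simp only [List.foldl_nil, List.nil_append, List.reverse_reverse]
    rw [join_singletons]
    exact String.ofList_toList.symm
  · rw [if_neg hit]
    have hkeys : (PySem.Dict.ofList punctuations).keys
        = (PySem.Dict.ofList punctuations).items.map Prod.fst := by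
      simp [PySem.Dict.keys]
    rw [hkeys, List.foldl_map]
    have hcong : ∀ (acc : List String × String),
        ∀ p ∈ (PySem.Dict.ofList punctuations).items,
        aLoop (PySem.Dict.ofList punctuations) acc p.1 = aStep acc p := by
      intro acc p hp
      have hget : (PySem.Dict.ofList punctuations).get? p.1 = some p.2 :=
        PySem.Dict.get?_of_mem_items _ (by simpa using hp)
          (PySem.Dict.nodup_keys_ofList _)
      simp [aLoop, aStep, hget]
    rw [PySem.List.foldl_congr_mem _ _ aStep _ hcong]
    rw [foldl_snd _ _ _ hit]
    have h1 := foldl_fst (PySem.Dict.ofList punctuations).items []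
      (text.toList.map (fun c => String.ofList [c])).reverse text
    simp only [List.nil_append, List.reverse_reverse] at h1
    rw [h1]
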